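-- pv_equiv track=rewrite | github.com/wPJM86Pa030R/nyawit | scripts/pyro.py | parse_disk_command_target
-- ===== SOURCE A (Python) =====
-- from typing import Dict, List, Optional, Tuple
--
-- def parse_disk_command_target(command_name: str, args: List[str]) -> Tuple[Optional[str], Optional[str]]:
--     del command_name
--
--     options_ended = False
--     path_parts = []
--     for arg in args:
--         if not options_ended and arg == "--":
--             options_ended = True
--             continue
--         if not options_ended and arg.startswith("-"):
--             # Kompatibilitas: terima opsi apa pun seperti command shell, lalu abaikan.
--             # Contoh: /du -h, /df --si, dst.
--             continue
--         path_parts.append(arg)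
--     return " ".join(path_parts).strip() or ".", None
-- ===== SOURCE B (Python) =====
-- from typing import Dict, List, Optional, Tuple
--
-- def parse_disk_command_target(command_name: str, args: List[str]) -> Tuple[Optional[str], Optional[str]]:
--     del command_name
--     if "--" in args:
--         i = args.index("--")
--         path_parts = [a for a in args[:i] if not a.startswith("-")] + args[i + 1:]
--     else:
--         path_parts = [a for a in args if not a.startswith("-")]
--     return " ".join(path_parts).strip() or ".", None
-- ===== Notes on version B (the rewrite author's own statement) =====
-- stated objective: alternative
-- what changed: Replaces A's stateful boolean flag loop by a split at the first '--' (index + slices): the head is filtered by not startswith('-'), the tail is kept verbatim, then joined as before.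
import Mathlib
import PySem

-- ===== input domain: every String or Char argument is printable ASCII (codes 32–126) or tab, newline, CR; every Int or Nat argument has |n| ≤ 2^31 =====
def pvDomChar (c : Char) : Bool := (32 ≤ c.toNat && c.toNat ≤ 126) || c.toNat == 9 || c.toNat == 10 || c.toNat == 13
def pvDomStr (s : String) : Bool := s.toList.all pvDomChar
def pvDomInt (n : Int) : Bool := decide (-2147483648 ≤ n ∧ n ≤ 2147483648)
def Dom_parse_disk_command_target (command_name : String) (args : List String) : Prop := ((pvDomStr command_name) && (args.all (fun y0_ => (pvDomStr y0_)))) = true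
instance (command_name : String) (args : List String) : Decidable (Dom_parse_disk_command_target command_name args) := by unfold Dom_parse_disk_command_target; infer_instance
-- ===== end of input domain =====

-- B replaces A's stateful options_ended flag loop by a split at the first "--" (filter head, keep tail verbatim); alternative decomposition, same cost.


-- ===== PORT A =====
def pvStepA (st : Bool × List String) (arg : String) : Bool × List String :=
  if !st.1 && arg == "--" then (true, st.2)
  else if !st.1 && PySem.Str.startswith arg "-" then st
  else (st.1, st.2 ++ [arg])

def parse_disk_command_target (command_name : String) (args : List String) : Option String × Option String :=
  let _ := command_name
  let st := args.foldl pvStepA (false, [])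
  let s := PySem.Str.strip (PySem.Str.join " " st.2)
  (some (if s == "" then "." else s), none)

-- ===== PORT B =====
def parse_disk_command_target_alt (command_name : String) (args : List String) : Option String × Option String :=
  let _ := command_name
  let path_parts :=
    match PySem.List.index? args "--" with
    | some i =>
        (PySem.List.slice args (some 0) (some (i : Int))).filter
          (fun a => !PySem.Str.startswith a "-")
        ++ PySem.List.slice args (some ((i : Int) + 1)) none
    | none => args.filter (fun a => !PySem.Str.startswith a "-")
  let s := PySem.Str.strip (PySem.Str.join " " path_parts)
  (some (if s == "" then "." else s), none)

-- ===== PRECONDITION & SPEC =====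
def Spec_parse_disk_command_target (command_name : String) (args : List String) (out : Option String × Option String) : Prop := out = parse_disk_command_target_alt command_name args
instance (command_name : String) (args : List String) (out : Option String × Option String) : Decidable (Spec_parse_disk_command_target command_name args out) := by unfold Spec_parse_disk_command_target; infer_instance

-- ===== CLAIM (what is proved, stated in full; the proofs are below) =====
def Claim_equal_parse_disk_command_target : Prop := ∀ (command_name : String) (args : List String), Dom_parse_disk_command_target command_name args → Spec_parse_disk_command_target command_name args (parse_disk_command_target command_name args)

-- ===== LEMMAS AND PROOFS =====

-- B's parts list, named so the fold invariant can talk about it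
def pvPartsB (args : List String) : List String :=
  match PySem.List.index? args "--" with
  | some i =>
      (PySem.List.slice args (some 0) (some (i : Int))).filter
        (fun a => !PySem.Str.startswith a "-")
      ++ PySem.List.slice args (some ((i : Int) + 1)) none
  | none => args.filter (fun a => !PySem.Str.startswith a "-")

lemma pvFoldA_true (args : List String) (acc : List String) :
    args.foldl pvStepA (true, acc) = (true, acc ++ args) := by
  induction args generalizing acc with
  | nil => simp
  | cons x xs ih => simp [List.foldl, pvStepA, ih]

lemma pvPartsB_cons_delim (xs : List String) :
    pvPartsB ("--" :: xs) = xs := by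
  unfold pvPartsB
  rw [PySem.List.index?_cons_self]
  show (PySem.List.slice ("--" :: xs) (some 0) (some ((0 : Nat) : Int))).filter
      (fun a => !PySem.Str.startswith a "-")
    ++ PySem.List.slice ("--" :: xs) (some (((0 : Nat) : Int) + 1)) none = xs
  rw [show (((0 : Nat) : Int) + 1) = ((1 : Nat) : Int) by norm_num]
  simp only [PySem.List.slice_zero_start]
  rw [PySem.List.slice_to_natCast, PySem.List.slice_from_natCast]
  simp

lemma pvPartsB_cons_ne (x : String) (xs : List String) (hx : x ≠ "--") :
    pvPartsB (x :: xs) =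
      (if PySem.Str.startswith x "-" then [] else [x]) ++ pvPartsB xs := by
  unfold pvPartsB
  rw [PySem.List.index?_cons_of_ne _ hx]
  cases h : PySem.List.index? xs "--" with
  | none =>
      simp only [Option.map_none]
      split_ifs with h1 <;> simp_all
  | some i =>
      simp only [Option.map_some, PySem.List.slice_zero_start]
      rw [show ((i + 1 : Nat) : Int) + 1 = (((i + 2 : Nat)) : Int) by push_cast; ring]
      rw [show ((i : Nat) : Int) + 1 = (((i + 1 : Nat)) : Int) by push_cast; ring]
      rw [PySem.List.slice_to_natCast, PySem.List.slice_to_natCast,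
          PySem.List.slice_from_natCast, PySem.List.slice_from_natCast]
      rw [show i + 2 = (i + 1) + 1 from rfl]
      simp only [List.take_succ_cons, List.drop_succ_cons, List.filter_cons]
      split_ifs with h1 <;> simp_all

lemma pvFoldA_false (args : List String) (acc : List String) :
    args.foldl pvStepA (false, acc) = ((PySem.List.index? args "--").isSome, acc ++ pvPartsB args) := by
  induction args generalizing acc with
  | nil => simp [pvPartsB, PySem.List.index?]
  | cons x xs ih =>
      by_cases hx : x = "--"
      · subst hx
        simp [List.foldl, pvStepA, pvFoldA_true, pvPartsB_cons_delim]
      · have hne : (x == "--") = false := by simp [hx]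
        rw [List.foldl_cons]
        rw [show pvStepA (false, acc) x =
              (false, acc ++ (if PySem.Str.startswith x "-" then [] else [x])) by
          simp [pvStepA, hne]; split_ifs <;> simp]
        rw [ih, pvPartsB_cons_ne x xs hx,
            PySem.List.index?_cons_of_ne _ hx]
        cases PySem.List.index? xs "--" <;> simp

-- ===== VERDICT (by name: the statement is the Claim_ definition above) =====
theorem parse_disk_command_target_spec : Claim_equal_parse_disk_command_target := by
  intro command_name args _
  unfold Spec_parse_disk_command_target parse_disk_command_target parse_disk_command_target_alt
  rw [pvFoldA_false]
  rfl
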